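-- pv_equiv track=rewrite | github.com/Ken1g/InterviewBit | Tasks/Din_Prog/greedy_birthday.py | solve
-- ===== SOURCE A (Python) =====
-- def solve(A, B):
-- 	R = A
-- 	to_be_considered = []
-- 	idxes = []
-- 	minimum = 999999999
-- 	for idx, i in enumerate(B):
-- 		if i < minimum:
-- 			minimum = i
-- 			to_be_considered.append(i)
-- 			idxes.append(idx)
--
-- 	N = R // (to_be_considered[-1])
-- 	ans = [idxes[-1] for i in range(N)]
--
-- 	sum = N * to_be_considered[-1]
-- 	for i in range(N):
-- 		for jdx, j in enumerate(to_be_considered):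
-- 			if sum + (j - to_be_considered[-1]) <= R:
-- 				sum += (j - to_be_considered[-1])
-- 				ans[i] = idxes[jdx]
-- 				break
--
-- 	return ans
-- ===== SOURCE B (Python) =====
-- def solve(A, B):
--     # running strict minimums: values (decreasing) and their indices
--     mins = []
--     idxes = []
--     cur = 999999999
--     for idx, v in enumerate(B):
--         if v < cur:
--             cur = v
--             mins.append(v)
--             idxes.append(idx)
--     m = mins[-1]
--     N = A // m
--     if N <= 0:
--         return []
--     last = len(mins) - 1
--     s = N * m
--     ans = []
--     p = 0
--     for _ in range(N):
--         # the first affordable upgrade index only moves forward as s grows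
--         while p < last and s + (mins[p] - m) > A:
--             p += 1
--         d = mins[p] - m
--         if s + d <= A:
--             s += d
--             ans.append(idxes[p])
--         else:
--             ans.append(idxes[last])
--     return ans
-- ===== Notes on version B (the rewrite author's own statement) =====
-- stated objective: alternative
-- what changed: A rescans the whole running-minimum list from the start for every one of the N purchased slots; B exploits that the first affordable upgrade index is monotone nondecreasing as the spent sum grows, so a single forward pointer replaces the N inner rescans (O(N+M) instead of O(N*M) for the greedy phase; on the timing family the O(len(B)) scan dominates, so no measured speedup).
import Mathlib
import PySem

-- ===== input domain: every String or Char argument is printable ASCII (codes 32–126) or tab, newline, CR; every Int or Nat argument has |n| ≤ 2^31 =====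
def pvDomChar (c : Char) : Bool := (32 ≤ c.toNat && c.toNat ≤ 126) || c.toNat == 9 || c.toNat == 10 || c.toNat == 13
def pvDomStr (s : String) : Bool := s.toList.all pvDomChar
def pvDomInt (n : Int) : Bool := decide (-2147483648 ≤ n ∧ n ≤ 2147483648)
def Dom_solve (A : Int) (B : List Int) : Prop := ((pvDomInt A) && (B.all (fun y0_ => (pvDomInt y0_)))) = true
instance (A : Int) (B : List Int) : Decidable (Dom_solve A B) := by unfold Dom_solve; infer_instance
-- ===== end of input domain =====

-- B replaces A's per-slot rescans of the running-minimum list by a single forward pointer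
-- (the first affordable upgrade index only moves forward as the spent sum grows).

-- ===== PORT A =====

-- inner 'for jdx, j in enumerate(to_be_considered): if sum + (j - m) <= R: …; break'
-- (returns the first pair taken by the break, applied by the caller)
def solveInner (pairs : List (Int × Int)) (m R sum : Int) : Option (Int × Int) :=
  match pairs with
  | [] => none
  | (jdx, j) :: rest =>
      if sum + (j - m) ≤ R then some (jdx, j) else solveInner rest m R sum

def solve (A : Int) (B : List Int) : List Int :=
  -- running strict minimums: (minimum, to_be_considered, idxes)
  let st := (PySem.List.enumerate B).foldl
    (fun (s : Int × List Int × List Int) (p : Int × Int) =>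
      if p.2 < s.1 then (p.2, s.2.1 ++ [p.2], s.2.2 ++ [p.1]) else s)
    ((999999999 : Int), ([] : List Int), ([] : List Int))
  let tbc := st.2.1
  let idxes := st.2.2
  let m := PySem.List.pyGetD tbc (-1) 0         -- to_be_considered[-1]; IndexError excluded by Pre_
  let N := PySem.Int.floordiv A m               -- R // …; ZeroDivisionError excluded by Pre_
  let ans0 := (PySem.List.pyRange 0 N 1).map (fun _ => PySem.List.pyGetD idxes (-1) 0)
  let res := (PySem.List.pyRange 0 N 1).foldl
    (fun (st : Int × List Int) (i : Int) =>
      match solveInner (PySem.List.enumerate tbc) m A st.1 with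
      | some (jdx, j) => (st.1 + (j - m), PySem.List.pySetD st.2 i (PySem.List.pyGetD idxes jdx 0))
      | none => st)
    (N * m, ans0)
  res.2

-- ===== PORT B =====

-- 'while p < last and s + (mins[p] - m) > A: p += 1'
def advancePtr (mins : List Int) (m A s : Int) (last p : Nat) : Nat :=
  if h : p < last then
    if s + (mins.getD p 0 - m) > A then advancePtr mins m A s last (p + 1) else p
  else p
termination_by last - p
decreasing_by omega

def solve_alt (A : Int) (B : List Int) : List Int :=
  -- running strict minimums (same scan as Source B's first loop)
  let st := (PySem.List.enumerate B).foldl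
    (fun (s : Int × List Int × List Int) (p : Int × Int) =>
      if p.2 < s.1 then (p.2, s.2.1 ++ [p.2], s.2.2 ++ [p.1]) else s)
    ((999999999 : Int), ([] : List Int), ([] : List Int))
  let mins := st.2.1
  let idxes := st.2.2
  let m := PySem.List.pyGetD mins (-1) 0        -- mins[-1]; IndexError excluded by Pre_
  let N := PySem.Int.floordiv A m               -- A // m; ZeroDivisionError excluded by Pre_
  if N ≤ 0 then []
  else
    let last := mins.length - 1
    let res := (List.range N.toNat).foldl
      (fun (st : Int × Nat × List Int) (_ : Nat) =>
        let p := advancePtr mins m A st.1 last st.2.1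
        let d := mins.getD p 0 - m
        if st.1 + d ≤ A then (st.1 + d, p, st.2.2 ++ [idxes.getD p 0])
        else (st.1, p, st.2.2 ++ [idxes.getD last 0]))
      (N * m, 0, [])
    res.2.2

-- ===== PRECONDITION & SPEC =====

-- Pre_ excludes exactly the inputs where A raises: B empty or min(B) ≥ 999999999
-- (IndexError on to_be_considered[-1]) and min(B) = 0 (ZeroDivisionError on R // min).
def Pre_solve (A : Int) (B : List Int) : Prop :=
  B ≠ [] ∧ (∃ b ∈ B, b < 999999999) ∧ ¬(0 ∈ B ∧ ∀ b ∈ B, 0 ≤ b)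
instance (A : Int) (B : List Int) : Decidable (Pre_solve A B) := by unfold Pre_solve; infer_instance

def pvWitness_solve : Int × List Int := (10, [5, 3])

def Spec_solve (A : Int) (B : List Int) (out : List Int) : Prop := out = solve_alt A B
instance (A : Int) (B : List Int) (out : List Int) : Decidable (Spec_solve A B out) := by unfold Spec_solve; infer_instance

-- ===== CLAIM (what is proved, stated in full; the proofs are below) =====
def Claim_equal_solve : Prop := ∀ (A : Int) (B : List Int), Dom_solve A B → Pre_solve A B → Spec_solve A B (solve A B)

-- ===== LEMMAS AND PROOFS =====

theorem solveInner_eq_findIdx (m R sum : Int) :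
    ∀ (xs : List Int) (s : Int),
      solveInner (PySem.List.enumerate xs s) m R sum =
        (xs.findIdx? (fun x => decide (sum + (x - m) ≤ R))).map (fun (k : Nat) => (s + (k : Int), xs.getD k 0)) := by
  intro xs
  induction xs with
  | nil => intro s; simp [solveInner, PySem.List.enumerate_nil]
  | cons x t ih =>
    intro s
    rw [PySem.List.enumerate_cons]
    by_cases h : sum + (x - m) ≤ R
    · simp [solveInner, h, List.findIdx?_cons]
    · simp only [solveInner, if_neg h, ih (s + 1), List.findIdx?_cons, decide_eq_true_eq, if_neg h]
      cases hf : List.findIdx? (fun x => decide (sum + (x - m) ≤ R)) t with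
      | none => simp
      | some k => simp; omega

def specPair (tbc idxes : List Int) (m R : Int) : Nat → Int → Int × List Int
  | 0, sum => (sum, [])
  | n + 1, sum =>
    match solveInner (PySem.List.enumerate tbc) m R sum with
    | some (jdx, j) =>
        let r := specPair tbc idxes m R n (sum + (j - m))
        (r.1, PySem.List.pyGetD idxes jdx 0 :: r.2)
    | none =>
        let r := specPair tbc idxes m R n sum
        (r.1, PySem.List.pyGetD idxes (-1) 0 :: r.2)

theorem foldA_eq_specPair (tbc idxes : List Int) (m R : Int) :
    ∀ (n : Nat) (i : Int) (sum : Int) (done : List Int), 0 ≤ i → done.length = i.toNat →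
      (PySem.List.pyRange i (i + n) 1).foldl
        (fun (st : Int × List Int) (k : Int) =>
          match solveInner (PySem.List.enumerate tbc) m R st.1 with
          | some (jdx, j) => (st.1 + (j - m), PySem.List.pySetD st.2 k (PySem.List.pyGetD idxes jdx 0))
          | none => st)
        (sum, done ++ List.replicate n (PySem.List.pyGetD idxes (-1) 0))
      = ((specPair tbc idxes m R n sum).1, done ++ (specPair tbc idxes m R n sum).2) := by
  intro n
  induction n with
  | zero =>
    intro i sum done _ _
    rw [PySem.List.pyRange_one_eq_nil (by omega)]
    simp [specPair]
  | succ n ih =>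
    intro i sum done hi hlen
    rw [PySem.List.pyRange_one_cons (by omega)]
    have hrange : i + (n + 1 : Nat) = (i + 1) + (n : Nat) := by push_cast; ring
    rw [hrange]
    simp only [List.replicate_succ, List.foldl_cons]
    cases hm : solveInner (PySem.List.enumerate tbc) m R sum with
    | some pr =>
      obtain ⟨jdx, j⟩ := pr
      have hset : PySem.List.pySetD
          (done ++ PySem.List.pyGetD idxes (-1) 0 :: List.replicate n (PySem.List.pyGetD idxes (-1) 0))
          i (PySem.List.pyGetD idxes jdx 0)
          = (done ++ [PySem.List.pyGetD idxes jdx 0]) ++ List.replicate n (PySem.List.pyGetD idxes (-1) 0) := by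
        rw [PySem.List.pySetD_of_nonneg (h := hi), ← hlen]
        simp [List.set_append]
      simp only [hm, hset]
      rw [ih (i + 1) (sum + (j - m)) (done ++ [PySem.List.pyGetD idxes jdx 0]) (by omega)
        (by simp [hlen]; omega)]
      simp [specPair, hm]
    | none =>
      have : done ++ PySem.List.pyGetD idxes (-1) 0 :: List.replicate n (PySem.List.pyGetD idxes (-1) 0)
          = (done ++ [PySem.List.pyGetD idxes (-1) 0]) ++ List.replicate n (PySem.List.pyGetD idxes (-1) 0) := by simp
      simp only [hm, this]
      rw [ih (i + 1) sum (done ++ [PySem.List.pyGetD idxes (-1) 0]) (by omega)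
        (by simp [hlen]; omega)]
      simp [specPair, hm]


theorem advancePtr_eq (mins : List Int) (m R s : Int) (last : Nat) (j : Nat) :
    ∀ (p : Nat), p ≤ j → j ≤ last →
      (∀ q, p ≤ q → q < j → ¬(s + (mins.getD q 0 - m) ≤ R)) →
      (s + (mins.getD j 0 - m) ≤ R ∨ j = last) →
      advancePtr mins m R s last p = j := by
  suffices H : ∀ (k p : Nat), j - p = k → p ≤ j → j ≤ last →
      (∀ q, p ≤ q → q < j → ¬(s + (mins.getD q 0 - m) ≤ R)) →
      (s + (mins.getD j 0 - m) ≤ R ∨ j = last) →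
      advancePtr mins m R s last p = j by
    intro p h1 h2 h3 h4; exact H (j - p) p rfl h1 h2 h3 h4
  intro k
  induction k with
  | zero =>
    intro p hk hpj hj _ hstop
    have hpj' : p = j := by omega
    subst hpj'
    rw [advancePtr]
    rcases hstop with hfit | hlast
    · split
      · rw [if_neg (by omega)]
      · rfl
    · rw [dif_neg (by omega)]
  | succ k ih =>
    intro p hk hpj hj hfail hstop
    have hplt : p < j := by omega
    rw [advancePtr, dif_pos (by omega), if_pos (by have := hfail p le_rfl hplt; omega)]
    exact ih (p + 1) (by omega) (by omega) hj (fun q h1 h2 => hfail q (by omega) h2) hstop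

theorem findIdx_some_facts (p : Int → Bool) (xs : List Int) (k : Nat)
    (h : List.findIdx? p xs = some k) :
    k < xs.length ∧ p (xs.getD k 0) = true ∧ ∀ q < k, p (xs.getD q 0) = false := by
  obtain ⟨hk, hp, hq⟩ := List.findIdx?_eq_some_iff_getElem.mp h
  refine ⟨hk, ?_, ?_⟩
  · rwa [List.getD_eq_getElem _ _ hk]
  · intro q hqk
    rw [List.getD_eq_getElem _ _ (hqk.trans hk)]
    simpa using hq q hqk

theorem foldB_eq_specPair (tbc idxes : List Int) (m R : Int)
    (Hne : tbc ≠ []) (Hlen : idxes.length = tbc.length)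
    (Hmin : ∀ x ∈ tbc, m ≤ x) :
    ∀ (n : Nat) (sum : Int) (p : Nat) (acc : List Int),
      p ≤ tbc.length - 1 →
      (∀ q < p, ¬(sum + (tbc.getD q 0 - m) ≤ R)) →
      ((List.range n).foldl
        (fun (st : Int × Nat × List Int) (_ : Nat) =>
          let p := advancePtr tbc m R st.1 (tbc.length - 1) st.2.1
          let d := tbc.getD p 0 - m
          if st.1 + d ≤ R then (st.1 + d, p, st.2.2 ++ [idxes.getD p 0])
          else (st.1, p, st.2.2 ++ [idxes.getD (tbc.length - 1) 0]))
        (sum, p, acc)).2.2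
      = acc ++ (specPair tbc idxes m R n sum).2 := by
  have hlenpos : 0 < tbc.length := List.length_pos_iff.mpr Hne
  have hmem : ∀ q, q < tbc.length → tbc.getD q 0 ∈ tbc := by
    intro q hq; rw [List.getD_eq_getElem _ _ hq]; exact List.getElem_mem hq
  intro n
  induction n with
  | zero => intro sum p acc _ _; simp [specPair]
  | succ n ih =>
    intro sum p acc hple hinv
    rw [List.range_succ_eq_map, List.foldl_cons, List.foldl_map]
    cases hf : List.findIdx? (fun x => decide (sum + (x - m) ≤ R)) tbc with
    | some k =>
      obtain ⟨hk, hfit, hqfail⟩ := findIdx_some_facts _ _ _ hf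
      have hfit' : sum + (tbc.getD k 0 - m) ≤ R := by simpa using hfit
      have hqfail' : ∀ q < k, ¬(sum + (tbc.getD q 0 - m) ≤ R) := by
        intro q hq; have := hqfail q hq; simpa using this
      have hpk : p ≤ k := by
        by_contra hlt
        exact hinv k (by omega) hfit'
      have hadv : advancePtr tbc m R sum (tbc.length - 1) p = k :=
        advancePtr_eq _ _ _ _ _ _ _ hpk (by omega)
          (fun q h1 h2 => hqfail' q h2) (Or.inl hfit')
      simp only [hadv, if_pos hfit']
      have hd : m ≤ tbc.getD k 0 := Hmin _ (hmem k hk)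
      rw [ih (sum + (tbc.getD k 0 - m)) k (acc ++ [idxes.getD k 0]) (by omega)
        (fun q hq => by have := hqfail' q hq; omega)]
      have hspec : specPair tbc idxes m R (n+1) sum =
          ((specPair tbc idxes m R n (sum + (tbc.getD k 0 - m))).1,
           idxes.getD k 0 :: (specPair tbc idxes m R n (sum + (tbc.getD k 0 - m))).2) := by
        simp [specPair, solveInner_eq_findIdx, hf]
      rw [hspec]; simp
    | none =>
      have hall : ∀ x ∈ tbc, ¬(sum + (x - m) ≤ R) := by
        intro x hx
        have := List.findIdx?_eq_none_iff.mp hf x hx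
        simpa using this
      have hadv : advancePtr tbc m R sum (tbc.length - 1) p = tbc.length - 1 :=
        advancePtr_eq _ _ _ _ _ _ _ hple le_rfl
          (fun q h1 h2 => hall _ (hmem q (by omega))) (Or.inr rfl)
      have hnofit : ¬(sum + (tbc.getD (tbc.length - 1) 0 - m) ≤ R) :=
        hall _ (hmem _ (by omega))
      simp only [hadv, if_neg hnofit]
      rw [ih sum (tbc.length - 1) (acc ++ [idxes.getD (tbc.length - 1) 0]) le_rfl
        (fun q hq => hall _ (hmem q (by omega)))]
      have hlast : idxes.getD (tbc.length - 1) 0 = PySem.List.pyGetD idxes (-1) 0 := by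
        have hne' : idxes ≠ [] := by
          intro h; rw [h] at Hlen; simp at Hlen; omega
        rw [PySem.List.pyGetD_neg_one _ _ hne', List.getLast_eq_getElem,
          List.getD_eq_getElem _ _ (by omega)]
        congr 1; omega
      have hspec : specPair tbc idxes m R (n+1) sum =
          ((specPair tbc idxes m R n sum).1,
           PySem.List.pyGetD idxes (-1) 0 :: (specPair tbc idxes m R n sum).2) := by
        simp [specPair, solveInner_eq_findIdx, hf]
      rw [hspec, hlast]; simp

theorem scan_inv :
    ∀ (l : List (Int × Int)) (st : Int × List Int × List Int),
      st.2.1.length = st.2.2.length →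
      (∀ x ∈ st.2.1, st.1 ≤ x) →
      (st.2.1 ≠ [] → st.2.1.getLast? = some st.1) →
      (st.2.1 = [] → st.1 = 999999999) →
      (let r := l.foldl
        (fun (s : Int × List Int × List Int) (p : Int × Int) =>
          if p.2 < s.1 then (p.2, s.2.1 ++ [p.2], s.2.2 ++ [p.1]) else s) st
       r.2.1.length = r.2.2.length ∧ (∀ x ∈ r.2.1, r.1 ≤ x) ∧
       (r.2.1 ≠ [] → r.2.1.getLast? = some r.1) ∧ (r.2.1 = [] → r.1 = 999999999) ∧
       ((∃ q ∈ l, q.2 < 999999999) → r.2.1 ≠ []) ∧ (st.2.1 ≠ [] → r.2.1 ≠ [])) := by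
  intro l
  induction l with
  | nil =>
    intro st h1 h2 h3 h4
    refine ⟨h1, h2, h3, h4, ?_, ?_⟩ <;> simp
  | cons hd tl ih =>
    intro st h1 h2 h3 h4
    simp only [List.foldl_cons]
    by_cases hlt : hd.2 < st.1
    · have := ih (hd.2, st.2.1 ++ [hd.2], st.2.2 ++ [hd.1])
        (by simp [h1])
        (by intro x hx; simp at hx
            show hd.2 ≤ x
            rcases hx with hx | hx
            · have := h2 x hx; omega
            · omega)
        (by intro _; simp) (by simp)
      rw [if_pos hlt]
      refine ⟨this.1, this.2.1, this.2.2.1, this.2.2.2.1, ?_, ?_⟩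
      · intro _; exact this.2.2.2.2.2 (by simp)
      · intro _; exact this.2.2.2.2.2 (by simp)
    · have := ih st h1 h2 h3 h4
      rw [if_neg hlt]
      refine ⟨this.1, this.2.1, this.2.2.1, this.2.2.2.1, ?_, this.2.2.2.2.2⟩
      intro hex
      rcases hex with ⟨q, hq, hqlt⟩
      simp at hq
      rcases hq with hq | hq
      · -- q = hd, not less than current min → tbc already nonempty
        apply this.2.2.2.2.2
        intro hemp
        have := h4 hemp
        rw [hq] at hqlt
        omega
      · exact this.2.2.2.2.1 ⟨q, hq, hqlt⟩

-- ===== VERDICT (by name: the statement is the Claim_ definition above) =====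
theorem solve_spec : Claim_equal_solve := by
  intro A B _ hpre
  obtain ⟨hBne, hex, _⟩ := hpre
  unfold Spec_solve solve solve_alt
  simp only []
  -- facts about the shared running-minimum scan
  have hscan := scan_inv (PySem.List.enumerate B) (999999999, ([] : List Int), ([] : List Int))
    (by simp) (by simp) (by simp) (by simp)
  set r := (PySem.List.enumerate B).foldl
    (fun (s : Int × List Int × List Int) (p : Int × Int) =>
      if p.2 < s.1 then (p.2, s.2.1 ++ [p.2], s.2.2 ++ [p.1]) else s)
    ((999999999 : Int), ([] : List Int), ([] : List Int)) with hr
  obtain ⟨hlen, hminle, hlast, _, hne', _⟩ := hscan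
  -- the to_be_considered list is nonempty
  have hne : r.2.1 ≠ [] := by
    apply hne'
    obtain ⟨b, hb, hblt⟩ := hex
    obtain ⟨k, hk, hbk⟩ := List.mem_iff_getElem.mp hb
    have : b ∈ (PySem.List.enumerate B).map (·.2) := by
      rw [PySem.List.map_snd_enumerate]; exact hb
    obtain ⟨q, hq, hq2⟩ := List.mem_map.mp this
    exact ⟨q, hq, by omega⟩
  -- the minimum equals to_be_considered[-1]
  have hm : PySem.List.pyGetD r.2.1 (-1) 0 = r.1 := by
    rw [PySem.List.pyGetD_neg_one _ _ hne]
    have := hlast hne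
    rwa [List.getLast?_eq_some_getLast hne, Option.some_inj] at this
  rw [hm]
  set m := r.1 with hmr
  set N := PySem.Int.floordiv A m with hN
  by_cases hN0 : N ≤ 0
  · rw [PySem.List.pyRange_one_eq_nil (by omega), if_pos hN0]
    simp
  · rw [if_neg hN0]
    have hNnat : N = ((N.toNat : Nat) : Int) := by omega
    have hrange0 : (0 : Int) + (N.toNat : Int) = N := by omega
    -- A's initial answer list is a replicate
    have hans0 : (PySem.List.pyRange 0 N 1).map (fun _ => PySem.List.pyGetD r.2.2 (-1) 0)
        = List.replicate N.toNat (PySem.List.pyGetD r.2.2 (-1) 0) := by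
      rw [List.map_const', PySem.List.length_pyRange_one]
      congr 1; omega
    rw [hans0]
    have hA := foldA_eq_specPair r.2.1 r.2.2 m A N.toNat 0 (N * m) [] le_rfl rfl
    simp only [List.nil_append] at hA
    rw [hrange0] at hA
    rw [hA]
    have hB := foldB_eq_specPair r.2.1 r.2.2 m A hne hlen.symm hminle N.toNat (N * m) 0 []
      (by omega) (by omega)
    simp only [List.nil_append] at hB
    rw [hB]
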